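-- pv_equiv track=rewrite | github.com/RinaSamokhvalova/Python_Seminars | Seminar_03/Homework/03-hw05.py | list_negaFibonacci
-- ===== SOURCE A (Python) =====
-- def list_negaFibonacci (n):
--     fibonacci_list = []
--     fibonacci_list.append(0)
--     fibonacci_list.append(1)
--     nega_fibonacci_list = []
--     nega_fibonacci_list.append(1)
--     for i in range(2, n + 1):
--         fibonacci_list.append(fibonacci_list[i-1]+fibonacci_list[i-2])
--         nega_fibonacci_list.append((-1)**(i+1)*fibonacci_list[i])
--     nega_fibonacci_list.reverse()
--     nega_fibonacci_list.extend(fibonacci_list)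
--     return nega_fibonacci_list
-- ===== SOURCE B (Python) =====
-- def list_negaFibonacci(n):
--     # One continuous sequence F(-m)..F(m): walk the pair recurrence down to the
--     # left end, then emit the whole list in a single forward Fibonacci pass.
--     m = max(n, 1)
--     a, b = 1, 0  # (F(1), F(0))
--     for _ in range(m + 1):
--         a, b = b, a - b          # step leftward: (F(k), F(k-1))
--     # now a = F(-m), b = F(-m-1)
--     res = []
--     x, y = b, a
--     for _ in range(2 * m + 1):
--         res.append(y)
--         x, y = y, x + y          # step rightward
--     return res
-- ===== Notes on version B (the rewrite author's own statement) =====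
-- stated objective: alternative
-- what changed: B drops A's two-list construction (a positive-index fib list read back by index, a nega list built with an alternating sign power, then reversed and concatenated) and instead treats the output as one continuous Fibonacci sequence: it pair-walks the recurrence down to the left end and emits the whole list in a single forward pass with F(k+1)=F(k)+F(k-1).
import Mathlib
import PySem

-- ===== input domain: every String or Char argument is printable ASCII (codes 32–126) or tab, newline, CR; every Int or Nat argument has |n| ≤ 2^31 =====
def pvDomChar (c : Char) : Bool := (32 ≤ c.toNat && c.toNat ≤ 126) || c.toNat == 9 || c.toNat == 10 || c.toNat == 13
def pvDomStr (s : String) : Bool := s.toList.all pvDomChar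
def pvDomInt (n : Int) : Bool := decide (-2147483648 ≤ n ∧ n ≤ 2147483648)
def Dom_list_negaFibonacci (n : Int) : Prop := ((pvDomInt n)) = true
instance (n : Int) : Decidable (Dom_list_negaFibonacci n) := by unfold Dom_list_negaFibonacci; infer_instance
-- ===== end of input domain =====

-- B builds the same list as one continuous Fibonacci run: pair-walk down to the left
-- end, then a single forward pass; no sign formula, no reversal (objective: alternative).

-- ===== PORT A =====
-- loop body of A's for-loop (indexing is always in range in A, so pyGetD is exact)
def fibA (st : List Int × List Int) (i : Int) : List Int × List Int :=
  let fib := st.1 ++ [PySem.List.pyGetD st.1 (i-1) 0 + PySem.List.pyGetD st.1 (i-2) 0]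
  (fib, st.2 ++ [(-1)^((i+1).toNat) * PySem.List.pyGetD fib i 0])

def list_negaFibonacci (n : Int) : List Int :=
  let st := (PySem.List.pyRange 2 (n+1) 1).foldl fibA ([0, 1], [1])
  st.2.reverse ++ st.1

-- ===== PORT B =====
def downB (p : Int × Int) (_ : Nat) : Int × Int := (p.2, p.1 - p.2)

def upB (st : List Int × Int × Int) (_ : Nat) : List Int × Int × Int :=
  (st.1 ++ [st.2.2], st.2.2, st.2.1 + st.2.2)

def list_negaFibonacci_alt (n : Int) : List Int :=
  let m := max n 1
  let ab := (List.range (m+1).toNat).foldl downB (1, 0)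
  ((List.range (2*m+1).toNat).foldl upB ([], ab.2, ab.1)).1

-- ===== PRECONDITION & SPEC =====
def Spec_list_negaFibonacci (n : Int) (out : List Int) : Prop := out = list_negaFibonacci_alt n
instance (n : Int) (out : List Int) : Decidable (Spec_list_negaFibonacci n out) := by unfold Spec_list_negaFibonacci; infer_instance

-- ===== CLAIM (what is proved, stated in full; the proofs are below) =====
def Claim_equal_list_negaFibonacci : Prop := ∀ (n : Int), Dom_list_negaFibonacci n → Spec_list_negaFibonacci n (list_negaFibonacci n)

-- ===== LEMMAS AND PROOFS =====

def fibZ : Nat → Int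
  | 0 => 0
  | 1 => 1
  | k+2 => fibZ k + fibZ (k+1)

def gseq : Nat → Int
  | 0 => 1
  | 1 => 0
  | k+2 => gseq k - gseq (k+1)

def negfib (k : Nat) : Int := (-1)^(k+1) * fibZ k

-- canonical value: canonM j = [F(-(j+1)), …, F(0), …, F(j+1)]
def canonM : Nat → List Int
  | 0 => [1, 0, 1]
  | j+1 => negfib (j+2) :: (canonM j ++ [fibZ (j+2)])

def linf (x y : Int) (k : Nat) : Int := x * fibZ k + y * fibZ (k+1)

def ppf (x y : Int) : Nat → Int
  | 0 => x
  | t+1 => linf x y t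

theorem fibZ_add2 (k : Nat) : fibZ (k+2) = fibZ k + fibZ (k+1) := rfl
theorem gseq_add2 (k : Nat) : gseq (k+2) = gseq k - gseq (k+1) := rfl

theorem gseq_spec : ∀ t : Nat, gseq (t+1) = (-1)^(t+1) * fibZ t ∧ gseq (t+2) = (-1)^(t+2) * fibZ (t+1) := by
  intro t
  induction t with
  | zero => decide
  | succ t ih =>
    refine ⟨ih.2, ?_⟩
    rw [gseq_add2 (t+1), ih.1, ih.2, fibZ_add2]
    ring

-- ===== A side =====
def FlL (k : Nat) : List Int := (List.range (k+2)).map fibZ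
def NlL (k : Nat) : List Int := 1 :: (List.range k).map (fun j => negfib (j+2))

theorem getD_FlL (k j : Nat) (h : j < k+2) : (FlL k).getD j 0 = fibZ j := by
  simp [FlL, List.getD, h]

theorem loopA : ∀ k : Nat, (PySem.List.pyRange 2 ((k:Int)+2) 1).foldl fibA ([0, 1], [1]) = (FlL k, NlL k) := by
  intro k
  induction k with
  | zero =>
    rw [PySem.List.pyRange_one_eq_nil (by norm_num)]
    simp [FlL, NlL]
    decide
  | succ k ih =>
    have hcast : ((k+1 : Nat) : Int) + 2 = ((k:Int) + 2) + 1 := by push_cast; ring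
    rw [hcast, PySem.List.pyRange_one_succ_right (by omega), List.foldl_append, ih]
    have h1 : ((k:Int)+2) - 1 = ((k+1 : Nat) : Int) := by push_cast; ring
    have h2 : ((k:Int)+2) - 2 = ((k : Nat) : Int) := by omega
    have hflen : (FlL k).length = k+2 := by simp [FlL]
    have hfib' : FlL k ++ [(FlL k).getD (k+1) 0 + (FlL k).getD k 0] = FlL (k+1) := by
      rw [getD_FlL k (k+1) (by omega), getD_FlL k k (by omega)]
      simp [FlL, List.range_succ, fibZ_add2]
      ring
    simp only [List.foldl_cons, List.foldl_nil, fibA, h1, h2,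
      PySem.List.pyGetD_natCast, hfib']
    have h3 : ((k:Int)+2) = ((k+2 : Nat) : Int) := by push_cast; ring
    rw [h3, PySem.List.pyGetD_natCast, getD_FlL (k+1) (k+2) (by omega)]
    have h4 : ((((k+2 : Nat) : Int)) + 1).toNat = k+3 := by omega
    rw [h4]
    exact Prod.ext rfl (by simp [NlL, List.range_succ, negfib])

theorem revA : ∀ k : Nat, (NlL k).reverse ++ FlL k = canonM k := by
  intro k
  induction k with
  | zero => simp [NlL, FlL, canonM]; decide
  | succ k ih =>
    have hN : NlL (k+1) = NlL k ++ [negfib (k+2)] := by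
      simp [NlL, List.range_succ]
    have hF : FlL (k+1) = FlL k ++ [fibZ (k+2)] := by
      simp [FlL, List.range_succ]
    rw [hN, hF, List.reverse_append]
    simp only [List.reverse_singleton, List.cons_append, canonM]
    rw [← ih]
    simp

theorem A_eq (n : Int) : list_negaFibonacci n = canonM ((max n 1).toNat - 1) := by
  by_cases h : n ≤ 1
  · have hmax : (max n 1).toNat - 1 = 0 := by omega
    rw [hmax]
    unfold list_negaFibonacci
    rw [PySem.List.pyRange_one_eq_nil (by omega)]
    decide
  · obtain ⟨k, hk⟩ : ∃ k : Nat, n = (k:Int) + 2 := ⟨(n-2).toNat, by omega⟩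
    subst hk
    have hmax : (max ((k:Int)+2) 1).toNat - 1 = k + 1 := by omega
    rw [hmax]
    unfold list_negaFibonacci
    have hcast : ((k:Int)+2) + 1 = ((k+1 : Nat) : Int) + 2 := by push_cast; ring
    rw [hcast, loopA (k+1)]
    exact revA (k+1)

-- ===== B side =====
theorem downP : ∀ t : Nat, (List.range t).foldl downB (1, 0) = (gseq t, gseq (t+1)) := by
  intro t
  induction t with
  | zero => decide
  | succ t ih =>
    rw [List.range_succ, List.foldl_append, ih]
    rfl

theorem pp_add (x y : Int) : ∀ t : Nat, ppf x y t + linf x y t = linf x y (t+1) := by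
  intro t
  cases t with
  | zero => simp [ppf, linf, fibZ]
  | succ t => simp only [ppf, linf, fibZ_add2]; ring

theorem upP (x y : Int) : ∀ t : Nat,
    (List.range t).foldl upB ([], x, y) = ((List.range t).map (linf x y), ppf x y t, linf x y t) := by
  intro t
  induction t with
  | zero => simp [ppf, linf, fibZ]
  | succ t ih =>
    rw [List.range_succ, List.foldl_append, ih]
    simp only [List.foldl_cons, List.foldl_nil, upB, List.map_append, List.map_cons, List.map_nil]
    exact Prod.ext rfl (Prod.ext rfl (pp_add x y t))

theorem gI : ∀ j : Nat,
    gseq (j+3) * fibZ (2*j+2) + gseq (j+2) * fibZ (2*j+3) = fibZ (j+1) ∧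
    gseq (j+3) * fibZ (2*j+3) + gseq (j+2) * fibZ (2*j+4) = fibZ (j+2) := by
  intro j
  induction j with
  | zero => decide
  | succ j ih =>
    have hf4 : fibZ (2*j+4) = fibZ (2*j+2) + fibZ (2*j+3) := fibZ_add2 (2*j+2)
    have hf5 : fibZ (2*j+5) = fibZ (2*j+3) + fibZ (2*j+4) := fibZ_add2 (2*j+3)
    have hf6 : fibZ (2*j+6) = fibZ (2*j+4) + fibZ (2*j+5) := fibZ_add2 (2*j+4)
    have hg : gseq (j+4) = gseq (j+2) - gseq (j+3) := gseq_add2 (j+2)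
    have hfj : fibZ (j+3) = fibZ (j+1) + fibZ (j+2) := fibZ_add2 (j+1)
    constructor
    · rw [show 2*(j+1)+2 = 2*j+4 from by ring, show 2*(j+1)+3 = 2*j+5 from by ring,
        show j+1+3 = j+4 from rfl, show j+1+2 = j+3 from rfl, show j+1+1 = j+2 from rfl,
        hg, hf5, hf4]
      linear_combination ih.2 - gseq (j+2) * hf4
    · rw [show 2*(j+1)+3 = 2*j+5 from by ring, show 2*(j+1)+4 = 2*j+6 from by ring,
        show j+1+3 = j+4 from rfl, show j+1+2 = j+3 from rfl,
        hg, hf6, hf5, hf4, hfj]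
      linear_combination ih.1 + ih.2 - gseq (j+2) * hf4

theorem linf_shift (j : Nat) : ∀ k : Nat,
    linf (gseq (j+4)) (gseq (j+3)) (k+1) = linf (gseq (j+3)) (gseq (j+2)) k := by
  intro k
  have hg : gseq (j+4) = gseq (j+2) - gseq (j+3) := gseq_add2 (j+2)
  simp only [linf, fibZ_add2 k, hg]
  ring

theorem Bmap : ∀ j : Nat, (List.range (2*j+3)).map (linf (gseq (j+3)) (gseq (j+2))) = canonM j := by
  intro j
  induction j with
  | zero => decide
  | succ j ih =>
    have e1 : 2*(j+1)+3 = ((2*j+4)+1 : Nat) := by ring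
    rw [e1, List.range_succ, List.map_append, List.range_succ_eq_map, List.map_cons, List.map_map]
    have hhead : linf (gseq (j+4)) (gseq (j+3)) 0 = negfib (j+2) :=
      calc linf (gseq (j+4)) (gseq (j+3)) 0 = gseq (j+3) := by simp [linf, fibZ]
        _ = negfib (j+2) := (gseq_spec (j+2)).1
    have hmid : (List.range (2*j+3)).map (linf (gseq (j+4)) (gseq (j+3)) ∘ Nat.succ)
        = canonM j := by
      rw [← ih]
      apply List.map_congr_left
      intro k _
      exact linf_shift j k
    have htail : linf (gseq (j+4)) (gseq (j+3)) (2*j+4) = fibZ (j+2) := by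
      have := (gI (j+1)).1
      rw [show 2*(j+1)+2 = 2*j+4 from by ring, show 2*(j+1)+3 = (2*j+4)+1 from by ring] at this
      simpa [linf] using this
    rw [show j+1+3 = j+4 from rfl, show j+1+2 = j+3 from rfl, hhead, hmid,
      List.map_singleton, htail]
    rfl

theorem B_eq (n : Int) : list_negaFibonacci_alt n = canonM ((max n 1).toNat - 1) := by
  have hm : 1 ≤ max n 1 := le_max_right n 1
  obtain ⟨j, hj⟩ : ∃ j : Nat, max n 1 = (j:Int) + 1 := ⟨(max n 1).toNat - 1, by omega⟩
  have hidx : (max n 1).toNat - 1 = j := by omega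
  unfold list_negaFibonacci_alt
  rw [hidx, hj]
  have h1 : (((j:Int)+1) + 1).toNat = j + 2 := by omega
  have h2 : (2*((j:Int)+1) + 1).toNat = 2*j + 3 := by omega
  simp only [h1, h2, downP (j+2)]
  rw [upP (gseq (j+3)) (gseq (j+2)) (2*j+3)]
  exact Bmap j

-- ===== VERDICT (by name: the statement is the Claim_ definition above) =====
theorem list_negaFibonacci_spec : Claim_equal_list_negaFibonacci := by
  intro n _
  unfold Spec_list_negaFibonacci
  rw [A_eq, B_eq]
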